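-- pv_equiv track=rewrite | github.com/dwilliams27/psp-autodecomp | tools/ab_schedule.py | _merge_thin_strata
-- ===== SOURCE A (Python) =====
-- from typing import Dict, Iterable, List, Optional, Set, Tuple
--
-- MIN_STRATUM_SIZE = 4
--
-- def _merge_thin_strata(strata: Dict[Tuple[int, int, bool], List[dict]]
--                        ) -> Dict[Tuple[int, int, bool], List[dict]]:
--     """Merge any stratum with < MIN_STRATUM_SIZE into the next-larger
--     `size_bucket` within the same (tier, has_class_context). If no
--     larger bucket exists, fold downward instead so the residue isn't
--     silently dropped — losing thin strata would skew the schedule's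
--     class-context distribution.
--     """
--     merged: Dict[Tuple[int, int, bool], List[dict]] = {}
--     for (tier, bucket, ctx), funcs in strata.items():
--         merged[(tier, bucket, ctx)] = list(funcs)
--
--     # Walk from the smallest bucket upward. A thin stratum gets folded
--     # into the next-larger bucket within the same (tier, ctx). If the
--     # absorbing bucket is itself thin after the merge, the next pass
--     # will fold it again.
--     by_group: Dict[Tuple[int, bool], List[int]] = {}
--     for (tier, bucket, ctx) in merged:
--         by_group.setdefault((tier, ctx), []).append(bucket)
--     for group in by_group.values():
--         group.sort()
--
--     for (tier, ctx), buckets in by_group.items():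
--         if len(buckets) <= 1:
--             continue
--         # Bottom-up merge: fold thin lower buckets into the next-larger.
--         i = 0
--         while i < len(buckets) - 1:
--             this_b = buckets[i]
--             next_b = buckets[i + 1]
--             this_key = (tier, this_b, ctx)
--             next_key = (tier, next_b, ctx)
--             if len(merged.get(this_key, [])) < MIN_STRATUM_SIZE:
--                 merged.setdefault(next_key, []).extend(merged.pop(this_key, []))
--                 buckets.pop(i)
--                 continue
--             i += 1
--         # Top-down: a thin top bucket has no larger neighbor. Fold it
--         # into the bucket below so it doesn't get assigned alone.
--         if buckets:
--             top_b = buckets[-1]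
--             top_key = (tier, top_b, ctx)
--             while len(buckets) >= 2 and len(merged.get(top_key, [])) < MIN_STRATUM_SIZE:
--                 prev_b = buckets[-2]
--                 prev_key = (tier, prev_b, ctx)
--                 merged.setdefault(prev_key, []).extend(merged.pop(top_key, []))
--                 buckets.pop()
--                 if not buckets:
--                     break
--                 top_b = buckets[-1]
--                 top_key = (tier, top_b, ctx)
--
--     # Drop empty entries the merging may have left behind.
--     return {k: v for k, v in merged.items() if v}
-- ===== SOURCE B (Python) =====
-- MIN_STRATUM_SIZE = 4
--
-- def _merge_thin_strata(strata):
--     """Same merge as the two-phase cascade, done in a single forward carry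
--     pass per (tier, ctx) group, with an explicit last-bucket residue step."""
--     merged = {}
--     for (tier, bucket, ctx), funcs in strata.items():
--         merged[(tier, bucket, ctx)] = list(funcs)
--
--     by_group = {}
--     for (tier, bucket, ctx) in merged:
--         by_group.setdefault((tier, ctx), []).append(bucket)
--
--     for (tier, ctx), group in by_group.items():
--         buckets = sorted(group)
--         if len(buckets) <= 1:
--             continue
--         # Carry thin strata upward in `pending`; fat buckets absorb it.
--         pending = []
--         last_landing = None
--         for b in buckets[:-1]:
--             key = (tier, b, ctx)
--             current = merged[key] + pending
--             if len(current) < MIN_STRATUM_SIZE: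
--                 del merged[key]
--                 pending = current
--             else:
--                 merged[key] = current
--                 last_landing = key
--                 pending = []
--         last_key = (tier, buckets[-1], ctx)
--         current = merged[last_key] + pending
--         if len(current) >= MIN_STRATUM_SIZE or last_landing is None:
--             merged[last_key] = current
--         else:
--             del merged[last_key]
--             merged[last_landing] = merged[last_landing] + current
--
--     return {k: v for k, v in merged.items() if v}
-- ===== Notes on version B (the rewrite author's own statement) =====
-- stated objective: simpler
-- what changed: Replaces the two-phase in-place cascade (index-walking bottom-up while loop that pops merged buckets from the list, plus a separate top-down fold-back while loop) with a single forward pass per (tier, ctx) group that carries undersized strata in a `pending` accumulator and places the final residue in one explicit last-bucket step.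
import Mathlib
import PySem

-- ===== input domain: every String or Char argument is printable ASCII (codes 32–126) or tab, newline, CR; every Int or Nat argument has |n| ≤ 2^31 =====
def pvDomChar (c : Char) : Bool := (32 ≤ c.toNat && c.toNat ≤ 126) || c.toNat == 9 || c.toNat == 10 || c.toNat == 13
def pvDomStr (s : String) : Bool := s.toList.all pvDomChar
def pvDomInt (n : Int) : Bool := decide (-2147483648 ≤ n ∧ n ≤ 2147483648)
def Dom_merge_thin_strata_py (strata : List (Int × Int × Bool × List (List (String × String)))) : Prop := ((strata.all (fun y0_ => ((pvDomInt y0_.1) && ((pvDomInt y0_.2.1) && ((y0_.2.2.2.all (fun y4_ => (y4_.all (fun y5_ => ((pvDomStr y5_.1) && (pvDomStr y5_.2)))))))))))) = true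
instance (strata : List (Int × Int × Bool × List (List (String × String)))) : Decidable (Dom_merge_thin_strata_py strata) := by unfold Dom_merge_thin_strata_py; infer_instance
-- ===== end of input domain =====

-- B replaces A's two-phase in-place cascade (bottom-up index/pop while loop + top-down fold-back
-- while loop) by a single forward carry pass per (tier, ctx) group with an explicit residue step
-- (objective: simpler). Python A and B mutate nothing observable; equivalence is about the return value.

-- ===== PORT A =====
-- bottom-up while loop: `i = 0; while i < len(buckets) - 1: ...` mutating merged and buckets
def buLoopA (m : PySem.Dict (Int × Int × Bool) (List (List (String × String)))) (t : Int) (c : Bool)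
    (bs : List Int) (i : Nat) :
    PySem.Dict (Int × Int × Bool) (List (List (String × String))) × List Int :=
  if _h : i < bs.length - 1 then
    let thisB := (bs[i]?).getD 0
    let nextB := (bs[i+1]?).getD 0
    let thisK := (t, thisB, c)
    let nextK := (t, nextB, c)
    if (m.getD thisK []).length < 4 then
      -- merged.setdefault(next_key, []).extend(merged.pop(this_key, []))
      let m1 := m.setdefault nextK []
      let pend := m1.getD thisK []
      let m2 := ((m1.erase thisK).insert nextK (m1.getD nextK [] ++ pend))
      buLoopA m2 t c (bs.eraseIdx i) i
    else
      buLoopA m t c bs (i + 1)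
  else (m, bs)
termination_by bs.length - i
decreasing_by
  · simp only [List.length_eraseIdx]; split <;> omega
  · omega

-- top-down while loop: fold a thin top bucket into the bucket below it
def tdLoopA (m : PySem.Dict (Int × Int × Bool) (List (List (String × String)))) (t : Int) (c : Bool)
    (bs : List Int) :
    PySem.Dict (Int × Int × Bool) (List (List (String × String))) :=
  if _h : 2 ≤ bs.length then
    let topB := (bs[bs.length - 1]?).getD 0
    let topK := (t, topB, c)
    if (m.getD topK []).length < 4 then
      let prevB := (bs[bs.length - 2]?).getD 0
      let prevK := (t, prevB, c)
      -- merged.setdefault(prev_key, []).extend(merged.pop(top_key, []))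
      let m1 := m.setdefault prevK []
      let v := m1.getD topK []
      let m2 := ((m1.erase topK).insert prevK (m1.getD prevK [] ++ v))
      tdLoopA m2 t c bs.dropLast
    else m
  else m
termination_by bs.length
decreasing_by
  simp only [List.length_dropLast]; omega

def merge_thin_strata_py (strata : List (Int × Int × Bool × List (List (String × String)))) :
    List (Int × Int × Bool × List (List (String × String))) :=
  let merged := strata.foldl
    (fun d e => d.insert (e.1, e.2.1, e.2.2.1) e.2.2.2) PySem.Dict.empty
  let byGroup := merged.keys.foldl
    (fun g k => g.modify (k.1, k.2.2) [] (· ++ [k.2.1])) PySem.Dict.empty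
  -- for group in by_group.values(): group.sort()
  let byGroup := PySem.Dict.mk
    (byGroup.items.map (fun p => (p.1, PySem.List.sorted p.2 (fun x => x) false)))
  let merged := byGroup.items.foldl
    (fun m p =>
      if p.2.length ≤ 1 then m
      else
        let r := buLoopA m p.1.1 p.1.2 p.2 0
        if r.2.isEmpty then r.1 else tdLoopA r.1 p.1.1 p.1.2 r.2)
    merged
  (merged.items.filter (fun kv => !kv.2.isEmpty)).map
    (fun kv => (kv.1.1, kv.1.2.1, kv.1.2.2, kv.2))

-- ===== PORT B =====
-- one carry step of B's forward pass: state = (merged, pending, last_landing)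
def carryB (t : Int) (c : Bool)
    (st : PySem.Dict (Int × Int × Bool) (List (List (String × String)))
          × List (List (String × String)) × Option (Int × Int × Bool))
    (b : Int) :
    PySem.Dict (Int × Int × Bool) (List (List (String × String)))
      × List (List (String × String)) × Option (Int × Int × Bool) :=
  let key := (t, b, c)
  let cur := st.1.getD key [] ++ st.2.1
  if cur.length < 4 then (st.1.erase key, cur, st.2.2)
  else (st.1.insert key cur, [], some key)

-- B's explicit residue step at the group's largest bucket
def lastFixB (t : Int) (c : Bool)
    (m : PySem.Dict (Int × Int × Bool) (List (List (String × String))))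
    (pend : List (List (String × String))) (ll : Option (Int × Int × Bool)) (lastB : Int) :
    PySem.Dict (Int × Int × Bool) (List (List (String × String))) :=
  let lastK := (t, lastB, c)
  let cur := m.getD lastK [] ++ pend
  match ll with
  | none => m.insert lastK cur
  | some llk =>
    if cur.length < 4 then (m.erase lastK).insert llk ((m.erase lastK).getD llk [] ++ cur)
    else m.insert lastK cur

def groupB (m : PySem.Dict (Int × Int × Bool) (List (List (String × String))))
    (t : Int) (c : Bool) (buckets : List Int) :
    PySem.Dict (Int × Int × Bool) (List (List (String × String))) :=
  if buckets.length ≤ 1 then m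
  else
    let st := buckets.dropLast.foldl (carryB t c) (m, [], none)
    lastFixB t c st.1 st.2.1 st.2.2 ((buckets[buckets.length - 1]?).getD 0)

def merge_thin_strata_py_alt (strata : List (Int × Int × Bool × List (List (String × String)))) :
    List (Int × Int × Bool × List (List (String × String))) :=
  let merged := strata.foldl
    (fun d e => d.insert (e.1, e.2.1, e.2.2.1) e.2.2.2) PySem.Dict.empty
  let byGroup := merged.keys.foldl
    (fun g k => g.modify (k.1, k.2.2) [] (· ++ [k.2.1])) PySem.Dict.empty
  let merged := byGroup.items.foldl
    (fun m p => groupB m p.1.1 p.1.2 (PySem.List.sorted p.2 (fun x => x) false))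
    merged
  (merged.items.filter (fun kv => !kv.2.isEmpty)).map
    (fun kv => (kv.1.1, kv.1.2.1, kv.1.2.2, kv.2))

-- ===== PRECONDITION & SPEC =====
def Spec_merge_thin_strata_py (strata : List (Int × Int × Bool × List (List (String × String)))) (out : List (Int × Int × Bool × List (List (String × String)))) : Prop := out = merge_thin_strata_py_alt strata
instance (strata : List (Int × Int × Bool × List (List (String × String)))) (out : List (Int × Int × Bool × List (List (String × String)))) : Decidable (Spec_merge_thin_strata_py strata out) := by
  unfold Spec_merge_thin_strata_py; exact @instDecidableEqList _ (fun a b => instDecidableEqProd a b) _ _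

-- ===== CLAIM (what is proved, stated in full; the proofs are below) =====
def Claim_equal_merge_thin_strata_py : Prop := ∀ (strata : List (Int × Int × Bool × List (List (String × String)))), Dom_merge_thin_strata_py strata → Spec_merge_thin_strata_py strata (merge_thin_strata_py strata)

-- ===== LEMMAS AND PROOFS =====

-- basic facts about Dict.erase / insert not provided by PySem
theorem dict_get?_erase_of_ne {κ ν : Type} [BEq κ] [LawfulBEq κ]
    (d : PySem.Dict κ ν) (k k' : κ) (h : k' ≠ k) : (d.erase k).get? k' = d.get? k' := by
  obtain ⟨items⟩ := d
  induction items with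
  | nil => rfl
  | cons p l ih =>
    simp only [PySem.Dict.erase, PySem.Dict.get?] at ih ⊢
    rw [List.filter_cons]
    by_cases hp : p.1 = k
    · rw [if_neg (by simp [hp]), List.find?_cons_of_neg (by simp [hp, Ne.symm h])]
      exact ih
    · by_cases hp' : p.1 = k'
      · rw [if_pos (by simp [hp]), List.find?_cons_of_pos (by simp [hp']),
          List.find?_cons_of_pos (by simp [hp'])]
      · rw [if_pos (by simp [hp]), List.find?_cons_of_neg (by simp [hp']),
          List.find?_cons_of_neg (by simp [hp'])]
        exact ih

theorem dict_contains_erase_of_ne {κ ν : Type} [BEq κ] [LawfulBEq κ]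
    (d : PySem.Dict κ ν) (k k' : κ) (h : k' ≠ k) : (d.erase k).contains k' = d.contains k' := by
  rw [PySem.Dict.contains_eq_isSome_get?, PySem.Dict.contains_eq_isSome_get?,
    dict_get?_erase_of_ne d k k' h]

theorem dict_getD_erase_of_ne {κ ν : Type} [BEq κ] [LawfulBEq κ]
    (d : PySem.Dict κ ν) (k k' : κ) (d0 : ν) (h : k' ≠ k) :
    (d.erase k).getD k' d0 = d.getD k' d0 := by
  rw [PySem.Dict.getD_eq_get?_getD, PySem.Dict.getD_eq_get?_getD, dict_get?_erase_of_ne d k k' h]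

theorem dict_nodup_keys_erase {κ ν : Type} [BEq κ]
    (d : PySem.Dict κ ν) (k : κ) (h : d.keys.Nodup) : (d.erase k).keys.Nodup := by
  obtain ⟨items⟩ := d
  exact List.Nodup.sublist (List.Sublist.map _ List.filter_sublist) h

theorem filter_map_overwrite {κ ν : Type} [BEq κ] [LawfulBEq κ]
    (l : List (κ × ν)) (k : κ) (v : ν) :
    (l.map (fun p => if (p.1 == k) = true then (k, v) else p)).filter (fun p => !(p.1 == k))
      = l.filter (fun p => !(p.1 == k)) := by
  induction l with
  | nil => rfl
  | cons p l ih =>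
    by_cases hp : p.1 = k
    · simp [List.map_cons, hp, ih]
    · simp [List.map_cons, hp, ih]

theorem dict_erase_insert_self {κ ν : Type} [BEq κ] [LawfulBEq κ]
    (d : PySem.Dict κ ν) (k : κ) (v : ν) : (d.insert k v).erase k = d.erase k := by
  obtain ⟨items⟩ := d
  simp only [PySem.Dict.insert, PySem.Dict.erase]
  split
  · congr 1
    exact filter_map_overwrite items k v
  · congr 1
    simp [List.filter_append]

theorem dict_insert_get?_self {κ ν : Type} [BEq κ] [LawfulBEq κ]
    (d : PySem.Dict κ ν) (k : κ) (v : ν) (h : d.get? k = some v) (hnd : d.keys.Nodup) :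
    d.insert k v = d := by
  have hc : d.contains k = true := by rw [PySem.Dict.contains_eq_isSome_get?, h]; rfl
  apply PySem.Dict.ext
  rw [PySem.Dict.items_insert_of_contains d v hc]
  have : ∀ p ∈ d.items, (if (p.1 == k) = true then (k, v) else p) = p := by
    intro p hp
    by_cases hpk : p.1 = k
    · have h2 : d.get? p.1 = some p.2 := PySem.Dict.get?_of_mem_items d (by simpa using hp) hnd
      rw [hpk, h] at h2
      have hv2 : v = p.2 := by injection h2
      rw [if_pos (by simp [hpk]), ← hpk, hv2]
    · simp [hpk]
  rw [List.map_congr_left this]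
  simp

theorem dict_insert_getD_self {κ ν : Type} [BEq κ] [LawfulBEq κ]
    (d : PySem.Dict κ ν) (k : κ) (d0 : ν) (hc : d.contains k = true) (hnd : d.keys.Nodup) :
    d.insert k (d.getD k d0) = d := by
  rw [PySem.Dict.contains_eq_isSome_get?] at hc
  obtain ⟨v, hv⟩ := Option.isSome_iff_exists.mp hc
  rw [PySem.Dict.getD_eq_get?_getD, hv]
  exact dict_insert_get?_self d k v hv hnd


-- list index auxiliaries
theorem idx_append_len {α : Type} (pre l : List α) (b : α) :
    (pre ++ b :: l)[pre.length]? = some b := by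
  rw [List.getElem?_append_right (Nat.le_refl _)]
  simp

theorem eraseIdx_append_len {α : Type} (pre l : List α) (b : α) :
    (pre ++ b :: l).eraseIdx pre.length = pre ++ l := by
  induction pre with
  | nil => rfl
  | cons x pre ih => simp [ih]

-- A's group phase, as applied to one group
def wrapTD (t : Int) (c : Bool)
    (r : PySem.Dict (Int × Int × Bool) (List (List (String × String))) × List Int) :
    PySem.Dict (Int × Int × Bool) (List (List (String × String))) :=
  if r.2.isEmpty then r.1 else tdLoopA r.1 t c r.2

-- CORE: A's bottom-up cascade followed by the top-down fold-back equals B's single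
-- carry pass followed by the residue fix, for one group
theorem buLoop_carry (t : Int) (c : Bool) (suf : List Int) :
    ∀ (pre : List Int) (m : PySem.Dict (Int × Int × Bool) (List (List (String × String))))
      (pend : List (List (String × String))),
      suf ≠ [] → (pre ++ suf).Nodup →
      (∀ b ∈ pre ++ suf, m.contains (t, b, c) = true) →
      m.keys.Nodup →
      (∀ b ∈ pre, 4 ≤ (m.getD (t, b, c) []).length) →
      wrapTD t c (buLoopA
          (m.insert (t, (suf[0]?).getD 0, c) (m.getD (t, (suf[0]?).getD 0, c) [] ++ pend))
          t c (pre ++ suf) pre.length)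
      = lastFixB t c
          (suf.dropLast.foldl (carryB t c) (m, pend, pre.getLast?.map (fun b => (t, b, c)))).1
          (suf.dropLast.foldl (carryB t c) (m, pend, pre.getLast?.map (fun b => (t, b, c)))).2.1
          (suf.dropLast.foldl (carryB t c) (m, pend, pre.getLast?.map (fun b => (t, b, c)))).2.2
          ((suf[suf.length - 1]?).getD 0) := by
  induction suf with
  | nil => intro pre m pend hne _ _ _ _; exact absurd rfl hne
  | cons b suf' IH =>
    intro pre m pend _ hnd hkeys hmnd hfat
    have hKb : m.contains (t, b, c) = true := hkeys b (by simp)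
    have hbpre : b ∉ pre := by
      intro hb
      rcases List.nodup_append.mp hnd with ⟨_, _, hdisj⟩
      exact (hdisj b hb b (by simp)) rfl
    cases suf' with
    | nil =>
      -- suf = [b]
      have hlast : (([b] : List Int))[([b] : List Int).length - 1]? = some b := by simp
      rw [hlast]
      simp only [List.getElem?_cons_zero, Option.getD_some]
      rw [buLoopA, dif_neg (by simp [List.length_append])]
      simp only [wrapTD]
      rw [if_neg (by simp)]
      have hdl : ([b] : List Int).dropLast = [] := rfl
      rw [hdl, List.foldl_nil]
      rcases List.eq_nil_or_concat pre with rfl | ⟨pre₀, p, rfl⟩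
      · -- no landing: tdLoopA is a no-op, B re-inserts under the last key
        rw [tdLoopA, dif_neg (by simp)]
        simp [lastFixB]
      · simp only [List.concat_eq_append] at hnd hkeys hmnd hfat hbpre ⊢
        have hpb : p ≠ b := by intro h; exact hbpre (by simp [h])
        have hKpb : ((t, p, c) : Int × Int × Bool) ≠ (t, b, c) := by simp [hpb]
        have hKp : m.contains (t, p, c) = true := hkeys p (by simp)
        have hcur : (m.insert (t, b, c) (m.getD (t, b, c) [] ++ pend)).getD (t, b, c) []
            = m.getD (t, b, c) [] ++ pend := PySem.Dict.getD_insert_self _ _ _ _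
        rw [tdLoopA, dif_pos (by simp [List.length_append])]
        have hlen1 : (pre₀ ++ [p] ++ [b]).length - 1 = (pre₀ ++ [p]).length := by
          simp [List.length_append]
        have htop : ((pre₀ ++ [p] ++ [b]))[(pre₀ ++ [p] ++ [b]).length - 1]? = some b := by
          rw [hlen1]; exact idx_append_len (pre₀ ++ [p]) [] b
        have hlen2 : (pre₀ ++ [p] ++ [b]).length - 2 = pre₀.length := by
          simp [List.length_append]
        have hprev : ((pre₀ ++ [p] ++ [b]))[(pre₀ ++ [p] ++ [b]).length - 2]? = some p := by
          rw [hlen2, List.append_assoc]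
          exact idx_append_len pre₀ [b] p
        rw [htop, hprev]
        simp only [Option.getD_some, hcur]
        rw [List.getLast?_concat]
        simp only [Option.map_some]
        by_cases hthin : (m.getD (t, b, c) [] ++ pend).length < 4
        · rw [if_pos hthin]
          rw [PySem.Dict.setdefault_of_contains _ []
            (by rw [PySem.Dict.contains_insert]; simp [hKp])]
          rw [dict_erase_insert_self]
          rw [PySem.Dict.getD_insert _ _ _ _ _ , if_neg hKpb, hcur]
          rw [List.dropLast_concat]
          have hm2fat : 4 ≤ ((((m.erase (t, b, c)).insert (t, p, c)
              (m.getD (t, p, c) [] ++ (m.getD (t, b, c) [] ++ pend)))).getD (t, p, c) []).length := by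
            rw [PySem.Dict.getD_insert_self]
            have := hfat p (by simp)
            simp [List.length_append]; omega
          have hres : tdLoopA ((m.erase (t, b, c)).insert (t, p, c)
              (m.getD (t, p, c) [] ++ (m.getD (t, b, c) [] ++ pend))) t c (pre₀ ++ [p])
              = (m.erase (t, b, c)).insert (t, p, c)
                (m.getD (t, p, c) [] ++ (m.getD (t, b, c) [] ++ pend)) := by
            rcases Nat.lt_or_ge (pre₀ ++ [p]).length 2 with hsm | hbig
            · rw [tdLoopA, dif_neg (by omega)]
            · rw [tdLoopA, dif_pos hbig]
              have hl : (pre₀ ++ [p]).length - 1 = pre₀.length := by simp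
              have hidx : (pre₀ ++ [p])[(pre₀ ++ [p]).length - 1]? = some p := by
                rw [hl]; exact idx_append_len pre₀ [] p
              rw [hidx]
              simp only [Option.getD_some]
              rw [if_neg (by omega)]
          rw [hres]
          simp only [lastFixB]
          rw [if_pos hthin]
          rw [dict_getD_erase_of_ne _ _ _ _ hKpb]
        · rw [if_neg hthin]
          simp only [lastFixB]
          rw [if_neg hthin]
    | cons b' rest =>
      have hbb' : b' ≠ b := by
        have : (b :: b' :: rest).Nodup := (List.nodup_append.mp hnd).2.1
        intro h; rw [h] at this; simp at this
      have hKb'Kb : ((t, b', c) : Int × Int × Bool) ≠ (t, b, c) := by simp [hbb']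
      have hKb' : m.contains (t, b', c) = true := hkeys b' (by simp)
      simp only [List.getElem?_cons_zero, Option.getD_some]
      rw [buLoopA, dif_pos (by simp [List.length_append])]
      have hthis : (pre ++ b :: b' :: rest)[pre.length]? = some b := idx_append_len pre _ b
      have hnext : (pre ++ b :: b' :: rest)[pre.length + 1]? = some b' := by
        have : pre ++ b :: b' :: rest = (pre ++ [b]) ++ b' :: rest := by simp
        rw [this]
        have hl : pre.length + 1 = (pre ++ [b]).length := by simp
        rw [hl]; exact idx_append_len (pre ++ [b]) _ b'
      rw [hthis, hnext]
      simp only [Option.getD_some]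
      have hcur : (m.insert (t, b, c) (m.getD (t, b, c) [] ++ pend)).getD (t, b, c) []
          = m.getD (t, b, c) [] ++ pend := PySem.Dict.getD_insert_self _ _ _ _
      rw [hcur]
      have hdl2 : ((b :: b' :: rest) : List Int).dropLast = b :: (b' :: rest).dropLast := rfl
      rw [hdl2, List.foldl_cons]
      have hidxR : ((b :: b' :: rest) : List Int)[(b :: b' :: rest).length - 1]?
          = (b' :: rest)[(b' :: rest).length - 1]? := by
        have h1 : ((b :: b' :: rest) : List Int).length - 1 = rest.length + 1 := by simp
        have h2 : ((b' :: rest) : List Int).length - 1 = rest.length := by simp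
        rw [h1, h2, List.getElem?_cons_succ]
      rw [hidxR]
      by_cases hthin : (m.getD (t, b, c) [] ++ pend).length < 4
      · rw [if_pos hthin]
        rw [PySem.Dict.setdefault_of_contains _ []
          (by rw [PySem.Dict.contains_insert]; simp [hKb'])]
        rw [dict_erase_insert_self]
        rw [PySem.Dict.getD_insert _ _ _ _ _, if_neg hKb'Kb, hcur]
        rw [eraseIdx_append_len]
        have hstep : carryB t c (m, pend, pre.getLast?.map (fun b => (t, b, c))) b
            = (m.erase (t, b, c), m.getD (t, b, c) [] ++ pend,
               pre.getLast?.map (fun b => (t, b, c))) := by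
          simp only [carryB]
          rw [if_pos hthin]
        rw [hstep]
        have hg : m.getD (t, b', c) [] = (m.erase (t, b, c)).getD (t, b', c) [] :=
          (dict_getD_erase_of_ne m _ _ _ hKb'Kb).symm
        rw [hg]
        exact IH pre (m.erase (t, b, c)) (m.getD (t, b, c) [] ++ pend)
          (by simp)
          (by
            refine List.Nodup.sublist ?_ hnd
            exact List.Sublist.append_left (List.sublist_cons_self _ _) _)
          (by
            intro x hx
            have hxb : x ≠ b := by
              intro h
              rw [h] at hx
              rcases List.mem_append.mp hx with hx1 | hx1
              · exact hbpre hx1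
              · have h2 : (b :: b' :: rest).Nodup := (List.nodup_append.mp hnd).2.1
                rw [List.nodup_cons] at h2
                exact h2.1 hx1
            rw [dict_contains_erase_of_ne _ _ _ (by simp [hxb])]
            exact hkeys x (by
              rcases List.mem_append.mp hx with hx1 | hx1
              · exact List.mem_append.mpr (Or.inl hx1)
              · exact List.mem_append.mpr (Or.inr (List.mem_cons_of_mem _ hx1))))
          (dict_nodup_keys_erase _ _ hmnd)
          (by
            intro x hx
            have hxb : x ≠ b := fun h => hbpre (h ▸ hx)
            rw [dict_getD_erase_of_ne _ _ _ _ (by simp [hxb])]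
            exact hfat x hx)
      · rw [if_neg hthin]
        have hstep : carryB t c (m, pend, pre.getLast?.map (fun b => (t, b, c))) b
            = (m.insert (t, b, c) (m.getD (t, b, c) [] ++ pend), [], some (t, b, c)) := by
          simp only [carryB]
          rw [if_neg hthin]
        rw [hstep]
        have hIH := IH (pre ++ [b]) (m.insert (t, b, c) (m.getD (t, b, c) [] ++ pend)) []
          (by simp)
          (by rw [List.append_assoc]; simpa using hnd)
          (by
            intro x hx
            rw [PySem.Dict.contains_insert]
            have hxmem : x ∈ pre ++ b :: b' :: rest := by
              rcases List.mem_append.mp hx with hx1 | hx1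
              · rcases List.mem_append.mp hx1 with hx2 | hx2
                · exact List.mem_append.mpr (Or.inl hx2)
                · have : x = b := by simpa using hx2
                  rw [this]; simp
              · exact List.mem_append.mpr (Or.inr (List.mem_cons_of_mem _ hx1))
            rw [hkeys x hxmem]; simp)
          (PySem.Dict.nodup_keys_insert _ _ _ hmnd)
          (by
            intro x hx
            rcases List.mem_append.mp hx with hx1 | hx1
            · have hxb : x ≠ b := fun h => hbpre (h ▸ hx1)
              rw [PySem.Dict.getD_insert _ _ _ _ _, if_neg (by simp [hxb])]
              exact hfat x hx1
            · have hxb : x = b := by simpa using hx1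
              subst hxb
              rw [PySem.Dict.getD_insert_self]
              omega)
        simp only [List.getElem?_cons_zero, Option.getD_some, List.append_nil] at hIH
        rw [dict_insert_getD_self _ _ []
          (by rw [PySem.Dict.contains_insert]; rw [hKb']; simp)
          (PySem.Dict.nodup_keys_insert _ _ _ hmnd)] at hIH
        rw [List.append_assoc, List.singleton_append, List.length_append, List.length_cons,
          List.length_nil] at hIH
        rw [List.getLast?_concat] at hIH
        simp only [Option.map_some] at hIH
        have hlen3 : pre.length + 1 = (pre ++ [b]).length := by simp
        exact hIH

-- A's whole per-group step equals B's groupB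
theorem stepA_eq_groupB (t : Int) (c : Bool)
    (m : PySem.Dict (Int × Int × Bool) (List (List (String × String)))) (bs : List Int)
    (hnd : bs.Nodup) (hkeys : ∀ b ∈ bs, m.contains (t, b, c) = true) (hmnd : m.keys.Nodup) :
    (if bs.length ≤ 1 then m
     else wrapTD t c (buLoopA m t c bs 0)) = groupB m t c bs := by
  by_cases hlen : bs.length ≤ 1
  · rw [if_pos hlen, groupB, if_pos hlen]
  · rw [if_neg hlen, groupB, if_neg hlen]
    cases bs with
    | nil => simp at hlen
    | cons b0 bs' =>
      have h := buLoop_carry t c (b0 :: bs') [] m []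
        (by simp) (by simpa using hnd) (by simpa using hkeys) hmnd (by simp)
      simp only [List.getElem?_cons_zero, Option.getD_some, List.nil_append,
        List.length_nil, List.getLast?_nil, Option.map_none, List.append_nil] at h
      rw [dict_insert_getD_self _ _ [] (hkeys b0 (by simp)) hmnd] at h
      exact h

-- reducing B's residue step on a literal landing state
theorem lastFixB_none (t : Int) (c : Bool)
    (m : PySem.Dict (Int × Int × Bool) (List (List (String × String))))
    (pend : List (List (String × String))) (lastB : Int) :
    lastFixB t c m pend none lastB
      = m.insert (t, lastB, c) (m.getD (t, lastB, c) [] ++ pend) := rfl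

theorem lastFixB_some (t : Int) (c : Bool)
    (m : PySem.Dict (Int × Int × Bool) (List (List (String × String))))
    (pend : List (List (String × String))) (llk : Int × Int × Bool) (lastB : Int) :
    lastFixB t c m pend (some llk) lastB
      = if (m.getD (t, lastB, c) [] ++ pend).length < 4 then
          (m.erase (t, lastB, c)).insert llk
            ((m.erase (t, lastB, c)).getD llk [] ++ (m.getD (t, lastB, c) [] ++ pend))
        else m.insert (t, lastB, c) (m.getD (t, lastB, c) [] ++ pend) := rfl

-- the landing key produced by the carry pass always lies in the group
theorem carry_ll (t : Int) (c : Bool) (l : List Int) :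
    ∀ (st : PySem.Dict (Int × Int × Bool) (List (List (String × String)))
        × List (List (String × String)) × Option (Int × Int × Bool)),
      (st.2.2 = none ∨ ∃ b0, st.2.2 = some (t, b0, c)) →
      ((l.foldl (carryB t c) st).2.2 = none ∨
       ∃ b0, (l.foldl (carryB t c) st).2.2 = some (t, b0, c)) := by
  induction l with
  | nil => intro st hll; exact hll
  | cons b l IH =>
    intro st hll
    rw [List.foldl_cons]
    refine IH _ ?_
    rw [carryB]
    split
    · exact hll
    · exact Or.inr ⟨b, rfl⟩

-- the carry pass only touches keys of its own (tier, ctx) group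
theorem carry_preserve (t : Int) (c : Bool) (l : List Int) :
    ∀ (st : PySem.Dict (Int × Int × Bool) (List (List (String × String)))
        × List (List (String × String)) × Option (Int × Int × Bool)),
      ∀ (k : Int × Int × Bool), (k.1, k.2.2) ≠ (t, c) →
      (l.foldl (carryB t c) st).1.get? k = st.1.get? k := by
  induction l with
  | nil => intro st k hk; rfl
  | cons b l IH =>
    intro st k hk
    have hkne : k ≠ (t, b, c) := by
      intro h; rw [h] at hk; exact hk rfl
    rw [List.foldl_cons, IH _ k hk, carryB]
    split
    · exact dict_get?_erase_of_ne _ _ _ hkne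
    · exact PySem.Dict.get?_insert_of_ne _ _ hkne

theorem carry_nodup (t : Int) (c : Bool) (l : List Int) :
    ∀ (st : PySem.Dict (Int × Int × Bool) (List (List (String × String)))
        × List (List (String × String)) × Option (Int × Int × Bool)),
      st.1.keys.Nodup → (l.foldl (carryB t c) st).1.keys.Nodup := by
  induction l with
  | nil => intro st h; exact h
  | cons b l IH =>
    intro st h
    rw [List.foldl_cons]
    refine IH _ ?_
    rw [carryB]
    split
    · exact dict_nodup_keys_erase _ _ h
    · exact PySem.Dict.nodup_keys_insert _ _ _ h

-- B's groupB only touches keys of its own (tier, ctx) group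
theorem groupB_get?_of_ne (t : Int) (c : Bool)
    (m : PySem.Dict (Int × Int × Bool) (List (List (String × String)))) (bs : List Int)
    (k : Int × Int × Bool) (hk : (k.1, k.2.2) ≠ (t, c)) :
    (groupB m t c bs).get? k = m.get? k := by
  have hkne : ∀ x : Int, k ≠ (t, x, c) := by
    intro x h; rw [h] at hk; exact hk rfl
  rw [groupB]
  split
  · rfl
  · simp only []
    have hget := carry_preserve t c bs.dropLast (m, [], none) k hk
    rcases carry_ll t c bs.dropLast (m, [], none) (Or.inl rfl) with h0 | ⟨b0, h0⟩
    · rw [h0, lastFixB_none, PySem.Dict.get?_insert_of_ne _ _ (hkne _)]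
      exact hget
    · rw [h0, lastFixB_some]
      split
      · rw [PySem.Dict.get?_insert_of_ne _ _ (hkne _),
          dict_get?_erase_of_ne _ _ _ (hkne _)]
        exact hget
      · rw [PySem.Dict.get?_insert_of_ne _ _ (hkne _)]
        exact hget

theorem groupB_nodup_keys (t : Int) (c : Bool)
    (m : PySem.Dict (Int × Int × Bool) (List (List (String × String)))) (bs : List Int)
    (h : m.keys.Nodup) : (groupB m t c bs).keys.Nodup := by
  rw [groupB]
  split
  · exact h
  · simp only []
    have h1 := carry_nodup t c bs.dropLast (m, [], none) h
    rcases carry_ll t c bs.dropLast (m, [], none) (Or.inl rfl) with h0 | ⟨b0, h0⟩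
    · rw [h0, lastFixB_none]
      exact PySem.Dict.nodup_keys_insert _ _ _ h1
    · rw [h0, lastFixB_some]
      split
      · exact PySem.Dict.nodup_keys_insert _ _ _ (dict_nodup_keys_erase _ _ h1)
      · exact PySem.Dict.nodup_keys_insert _ _ _ h1

-- the fold over all groups
theorem fold_groups_eq (items : List ((Int × Bool) × List Int)) :
    ∀ (m : PySem.Dict (Int × Int × Bool) (List (List (String × String)))),
      (∀ p ∈ items, ∀ b ∈ p.2, m.contains (p.1.1, b, p.1.2) = true) →
      (∀ p ∈ items, p.2.Nodup) →
      m.keys.Nodup →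
      (items.map Prod.fst).Nodup →
      items.foldl (fun m p =>
          if (PySem.List.sorted p.2 (fun x => x) false).length ≤ 1 then m
          else wrapTD p.1.1 p.1.2
            (buLoopA m p.1.1 p.1.2 (PySem.List.sorted p.2 (fun x => x) false) 0)) m
      = items.foldl (fun m p => groupB m p.1.1 p.1.2 (PySem.List.sorted p.2 (fun x => x) false)) m := by
  induction items with
  | nil => intro m _ _ _ _; rfl
  | cons p rest IH =>
    intro m hkeys hnds hmnd hgrp
    rw [List.foldl_cons, List.foldl_cons]
    have hstep := stepA_eq_groupB p.1.1 p.1.2 m (PySem.List.sorted p.2 (fun x => x) false)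
      ((PySem.List.sorted_perm p.2 (fun x => x) false).nodup_iff.mpr (hnds p (by simp)))
      (by
        intro b hb
        exact hkeys p (by simp) b ((PySem.List.mem_sorted p.2 (fun x => x) false b).mp hb))
      hmnd
    rw [hstep]
    have hgrp' : (rest.map Prod.fst).Nodup := (List.nodup_cons.mp hgrp).2
    have hp1 : p.1 ∉ rest.map Prod.fst := (List.nodup_cons.mp hgrp).1
    refine IH _ ?_ (fun q hq => hnds q (by simp [hq])) ?_ hgrp'
    · intro q hq b hb
      have hne : ((q.1.1, b, q.1.2) : Int × Int × Bool).1 = q.1.1 := rfl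
      have hq1 : q.1 ≠ p.1 := by
        intro h
        exact hp1 (h ▸ List.mem_map_of_mem hq)
      rw [PySem.Dict.contains_eq_isSome_get?,
        groupB_get?_of_ne p.1.1 p.1.2 m _ _ (by
          show ((q.1.1, b, q.1.2).1, (q.1.1, b, q.1.2).2.2) ≠ (p.1.1, p.1.2)
          intro h
          apply hq1
          have : (q.1.1, q.1.2) = (p.1.1, p.1.2) := h
          calc q.1 = (q.1.1, q.1.2) := rfl
            _ = (p.1.1, p.1.2) := this
            _ = p.1 := rfl),
        ← PySem.Dict.contains_eq_isSome_get?]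
      exact hkeys q (by simp [hq]) b hb
    · exact groupB_nodup_keys _ _ _ _ hmnd

-- ===== VERDICT (by name: the statement is the Claim_ definition above) =====
theorem merge_thin_strata_py_spec : Claim_equal_merge_thin_strata_py := by
  intro strata _
  unfold Spec_merge_thin_strata_py merge_thin_strata_py merge_thin_strata_py_alt
  simp only []
  have hmdnd : (strata.foldl (fun d e => d.insert (e.1, e.2.1, e.2.2.1) e.2.2.2)
      PySem.Dict.empty).keys.Nodup :=
    PySem.Dict.nodup_keys_foldl_insert_key strata (fun e => (e.1, e.2.1, e.2.2.1))
      (fun _ e => e.2.2.2) PySem.Dict.empty PySem.Dict.nodup_keys_empty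
  generalize hmd : strata.foldl (fun d e => d.insert (e.1, e.2.1, e.2.2.1) e.2.2.2)
      PySem.Dict.empty = md at *
  have hbgnd : (md.keys.foldl (fun g k => g.modify (k.1, k.2.2) [] (· ++ [k.2.1]))
      PySem.Dict.empty).keys.Nodup :=
    PySem.Dict.nodup_keys_foldl_modify_key md.keys (fun k => (k.1, k.2.2)) []
      (fun _ k => fun v => v ++ [k.2.1]) PySem.Dict.empty PySem.Dict.nodup_keys_empty
  have h2 : md.keys.foldl (fun g k => g.modify (k.1, k.2.2) [] (fun x => x ++ [k.2.1]))
        PySem.Dict.empty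
      = (md.keys.map (fun k => ((k.1, k.2.2), k.2.1))).foldl
          (fun d q => d.modify q.1 [] (fun x => x ++ [q.2])) PySem.Dict.empty := by
    rw [List.foldl_map]
  generalize hbg : md.keys.foldl (fun g k => g.modify (k.1, k.2.2) [] (· ++ [k.2.1]))
      PySem.Dict.empty = bg at *
  have hbgval : ∀ p ∈ bg.items,
      p.2 = (md.keys.filter (fun k => ((k.1, k.2.2) : Int × Bool) == p.1)).map
        (fun k => k.2.1) := by
    intro p hp
    have h1 : bg.getD p.1 [] = p.2 :=
      PySem.Dict.getD_of_mem_items bg (k := p.1) (v := p.2) (by simpa using hp) hbgnd []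
    rw [← h1, h2, PySem.Dict.getD_foldl_modify_append, PySem.Dict.getD_empty,
      List.nil_append, List.filter_map, List.map_map]
    rfl
  have hkeysbg : ∀ p ∈ bg.items, ∀ b ∈ p.2, md.contains (p.1.1, b, p.1.2) = true := by
    intro p hp b hb
    rw [hbgval p hp] at hb
    simp only [List.mem_map, List.mem_filter] at hb
    obtain ⟨k, ⟨hkmem, hkeq⟩, hkb⟩ := hb
    have hkeq' : (k.1, k.2.2) = p.1 := by simpa using hkeq
    have hkk : (p.1.1, b, p.1.2) = k := by
      have ha : k.1 = p.1.1 := by rw [← hkeq']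
      have hb2 : k.2.2 = p.1.2 := by rw [← hkeq']
      calc (p.1.1, b, p.1.2) = (k.1, k.2.1, k.2.2) := by rw [ha, hb2, hkb]
        _ = k := rfl
    rw [hkk, PySem.Dict.contains_iff_mem_keys]
    exact hkmem
  have hnds : ∀ p ∈ bg.items, p.2.Nodup := by
    intro p hp
    rw [hbgval p hp]
    refine List.Nodup.map_on ?_ (List.Nodup.filter _ hmdnd)
    intro x hx y hy hxy
    rw [List.mem_filter] at hx hy
    have hx2 : (x.1, x.2.2) = p.1 := by simpa using hx.2
    have hy2 : (y.1, y.2.2) = p.1 := by simpa using hy.2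
    have hxy2 := hx2.trans hy2.symm
    have ha : x.1 = y.1 := by
      have := congrArg (fun q : Int × Bool => q.1) hxy2; simpa using this
    have hc : x.2.2 = y.2.2 := by
      have := congrArg (fun q : Int × Bool => q.2) hxy2; simpa using this
    calc x = (x.1, x.2.1, x.2.2) := rfl
      _ = (y.1, y.2.1, y.2.2) := by rw [ha, hc]; rw [show x.2.1 = y.2.1 from hxy]
      _ = y := rfl
  have hgrpnd : (bg.items.map (fun p => p.1)).Nodup := hbgnd
  have hmain := fold_groups_eq bg.items md hkeysbg hnds hmdnd hgrpnd
  rw [List.foldl_map]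
  exact congrArg (fun (d : PySem.Dict (Int × Int × Bool) (List (List (String × String)))) =>
    (d.items.filter (fun kv => !kv.2.isEmpty)).map
      (fun kv => (kv.1.1, kv.1.2.1, kv.1.2.2, kv.2))) hmain
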